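-- pv_equiv track=rewrite | github.com/sstshemaybe-netizen/2025 | anotherOpenGraphClustering_npy.py | count_ones_odd_even_positions
-- ===== SOURCE A (Python) =====
-- def count_ones_odd_even_positions(lst, y_pred):
--
--     count_odd_positions = 0
--     count_even_positions = 0
--     for i in range(len(lst)):
--         if (i %2 == 0):
--             if (lst[i] == y_pred):
--                 count_even_positions+=1
--         else:
--             if (lst[i] == y_pred):
--                 count_odd_positions+=1
--
--     return count_even_positions, count_odd_positions
-- ===== SOURCE B (Python) =====
-- def count_ones_odd_even_positions(lst, y_pred):
--     return lst[::2].count(y_pred), lst[1::2].count(y_pred)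
-- ===== Notes on version B (the rewrite author's own statement) =====
-- stated objective: simpler
-- what changed: Replaces the index loop with a branch on i % 2 and two manual accumulators by slicing the list into its even-indexed and odd-indexed subsequences and counting matches in each with list.count.
import Mathlib
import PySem

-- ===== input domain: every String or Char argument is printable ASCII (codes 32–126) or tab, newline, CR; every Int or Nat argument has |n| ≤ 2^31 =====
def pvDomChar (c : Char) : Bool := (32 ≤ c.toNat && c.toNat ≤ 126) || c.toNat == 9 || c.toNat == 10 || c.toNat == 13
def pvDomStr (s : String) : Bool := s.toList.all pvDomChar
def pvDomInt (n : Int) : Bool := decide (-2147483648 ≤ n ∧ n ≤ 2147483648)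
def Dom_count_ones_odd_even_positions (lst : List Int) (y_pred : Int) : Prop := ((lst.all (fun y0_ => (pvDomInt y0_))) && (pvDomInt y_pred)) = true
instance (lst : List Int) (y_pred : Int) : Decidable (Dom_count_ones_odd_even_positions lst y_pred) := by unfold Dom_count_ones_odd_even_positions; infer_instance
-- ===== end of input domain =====

-- B replaces A's index loop (branching on i % 2 with two manual accumulators) by slicing the
-- list into its even- and odd-indexed subsequences and counting matches in each; objective: simpler.


-- ===== PORT A =====
-- for i in range(len(lst)): branch on i % 2, compare lst[i] == y_pred, bump one of two counters
def count_ones_odd_even_positions (lst : List Int) (y_pred : Int) : Int × Int :=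
  let st := (PySem.List.pyRange 0 (lst.length : Int) 1).foldl
    (fun (st : Int × Int) i =>
      if PySem.Int.mod i 2 == 0 then
        (if PySem.List.pyGetD lst i 0 == y_pred then (st.1, st.2 + 1) else st)
      else
        (if PySem.List.pyGetD lst i 0 == y_pred then (st.1 + 1, st.2) else st))
    (0, 0)
  (st.2, st.1)

-- ===== PORT B =====
-- return lst[::2].count(y_pred), lst[1::2].count(y_pred)
def count_ones_odd_even_positions_alt (lst : List Int) (y_pred : Int) : Int × Int :=
  ((PySem.List.count ((PySem.List.slice? lst none none 2).getD []) y_pred : Int),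
   (PySem.List.count ((PySem.List.slice? lst (some 1) none 2).getD []) y_pred : Int))

-- ===== PRECONDITION & SPEC =====
def Spec_count_ones_odd_even_positions (lst : List Int) (y_pred : Int) (out : Int × Int) : Prop := out = count_ones_odd_even_positions_alt lst y_pred
instance (lst : List Int) (y_pred : Int) (out : Int × Int) : Decidable (Spec_count_ones_odd_even_positions lst y_pred out) := by unfold Spec_count_ones_odd_even_positions; infer_instance

-- ===== CLAIM (what is proved, stated in full; the proofs are below) =====
def Claim_equal_count_ones_odd_even_positions : Prop := ∀ (lst : List Int) (y_pred : Int), Dom_count_ones_odd_even_positions lst y_pred → Spec_count_ones_odd_even_positions lst y_pred (count_ones_odd_even_positions lst y_pred)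

-- ===== LEMMAS AND PROOFS =====

-- the even- and odd-indexed subsequences of a list, mutually structurally
mutual
def pvEvens : List Int → List Int
  | [] => []
  | x :: xs => x :: pvOdds xs
def pvOdds : List Int → List Int
  | [] => []
  | _ :: xs => pvEvens xs
end

-- the element list slice? produces for step 2 from index 0 is pvEvens
theorem fm_evens : ∀ (xs : List Int),
    List.filterMap (fun k => xs[2*k]?) (List.range ((xs.length+1)/2)) = pvEvens xs
  | [] => by simp [pvEvens]
  | [x] => by simp [pvEvens, pvOdds, List.range_succ]
  | x :: z :: rest => by
    have ih := fm_evens rest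
    have hlen : ((x :: z :: rest).length + 1) / 2 = (rest.length+1)/2 + 1 := by
      simp [List.length_cons]; omega
    rw [hlen, List.range_succ_eq_map, List.filterMap_cons, List.filterMap_map]
    simp only [Nat.mul_zero, List.getElem?_cons_zero]
    show x :: List.filterMap _ _ = pvEvens (x :: z :: rest)
    have harg : (fun k => (x :: z :: rest)[2*k]?) ∘ Nat.succ = fun k => rest[2*k]? := by
      funext k
      show (x :: z :: rest)[2*(k+1)]? = rest[2*k]?
      have : 2*(k+1) = 2*k+1+1 := by omega
      rw [this]; simp
    rw [harg, ih]
    simp [pvEvens, pvOdds]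

-- lst[::2] is the even-indexed subsequence
theorem slice2_evens (xs : List Int) :
    PySem.List.slice? xs none none 2 = some (pvEvens xs) := by
  unfold PySem.List.slice? PySem.List.sliceIndices
  norm_num
  have hc : (if 0 < xs.length then (((xs.length:Int) + 2 - 1)/2).toNat else 0)
      = (xs.length + 1) / 2 := by
    split_ifs with h <;> omega
  have hf : (fun k : Nat => xs[((2:Int) * (k:Int)).toNat]?) = fun k => xs[2*k]? := by
    funext k
    have h2 : ((2:Int) * (k:Int)).toNat = 2*k := by omega
    rw [h2]
  rw [hc, hf, fm_evens]

-- lst[1::2] is the odd-indexed subsequence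
theorem slice2_odds (xs : List Int) :
    PySem.List.slice? xs (some 1) none 2 = some (pvOdds xs) := by
  cases xs with
  | nil => decide
  | cons x rest =>
    unfold PySem.List.slice? PySem.List.sliceIndices
    norm_num
    have hc : (if 0 < rest.length then (((rest.length:Int) + 2 - 1)/2).toNat else 0)
        = (rest.length + 1) / 2 := by
      split_ifs with h <;> omega
    have hf : (fun k : Nat => (x :: rest)[((1:Int) + 2 * (k:Int)).toNat]?)
        = fun k => rest[2*k]? := by
      funext k
      have h2 : ((1:Int) + 2 * (k:Int)).toNat = 2*k+1 := by omega
      rw [h2]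
      simp
    rw [hc, hf, fm_evens]
    simp [pvOdds]

-- A's loop body, with index/element pairs and propositional tests
theorem foldAux (y_pred : Int) (xs : List Int) : ∀ (s a b : Int),
    (PySem.List.enumerate xs s).foldl
      (fun (st : Int × Int) p =>
        if p.1 % 2 = 0 then
          (if p.2 = y_pred then (st.1, st.2 + 1) else st)
        else
          (if p.2 = y_pred then (st.1 + 1, st.2) else st)) (a, b) =
    if s % 2 = 0 then
      (a + ((pvOdds xs).count y_pred : Int), b + ((pvEvens xs).count y_pred : Int))
    else
      (a + ((pvEvens xs).count y_pred : Int), b + ((pvOdds xs).count y_pred : Int)) := by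
  induction xs with
  | nil => intro s a b; simp [PySem.List.enumerate, pvEvens, pvOdds]
  | cons x xs ih =>
    intro s a b
    rw [PySem.List.enumerate_cons, List.foldl_cons]
    by_cases hs : s % 2 = 0
    · have h1 : ¬ (s+1) % 2 = 0 := by omega
      simp only [if_pos hs]
      by_cases hx : x = y_pred
      · rw [if_pos hx, ih (s+1) a (b+1), if_neg h1]
        simp [pvEvens, pvOdds, hx, Prod.ext_iff]
        omega
      · rw [if_neg hx, ih (s+1) a b, if_neg h1]
        simp [pvEvens, pvOdds, hx]
    · have h1 : (s+1) % 2 = 0 := by omega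
      simp only [if_neg hs]
      by_cases hx : x = y_pred
      · rw [if_pos hx, ih (s+1) (a+1) b, if_pos h1]
        simp [pvEvens, pvOdds, hx, Prod.ext_iff]
        omega
      · rw [if_neg hx, ih (s+1) a b, if_pos h1]
        simp [pvEvens, pvOdds, hx]

-- A's fold, exactly as written in the port
theorem foldA_char (y_pred : Int) (xs : List Int) (s a b : Int) :
    (PySem.List.enumerate xs s).foldl
      (fun (st : Int × Int) p =>
        if PySem.Int.mod p.1 2 == 0 then
          (if p.2 == y_pred then (st.1, st.2 + 1) else st)
        else
          (if p.2 == y_pred then (st.1 + 1, st.2) else st)) (a, b) =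
    if PySem.Int.mod s 2 == 0 then
      (a + ((pvOdds xs).count y_pred : Int), b + ((pvEvens xs).count y_pred : Int))
    else
      (a + ((pvEvens xs).count y_pred : Int), b + ((pvOdds xs).count y_pred : Int)) := by
  have hpar : ∀ t : Int, PySem.Int.mod t 2 = t % 2 := fun t => by
    simp [PySem.Int.mod, Int.fmod_eq_emod_of_nonneg]
  simp only [hpar, beq_iff_eq]
  exact foldAux y_pred xs s a b

-- ===== VERDICT (by name: the statement is the Claim_ definition above) =====
theorem count_ones_odd_even_positions_spec : Claim_equal_count_ones_odd_even_positions := by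
  intro lst y_pred _
  unfold Spec_count_ones_odd_even_positions count_ones_odd_even_positions
    count_ones_odd_even_positions_alt
  have hmap := PySem.List.enumerate_eq_map_pyRange lst (0 : Int)
  have hb : (PySem.List.pyRange 0 (lst.length : Int) 1).foldl
      (fun (st : Int × Int) i =>
        if PySem.Int.mod i 2 == 0 then
          (if PySem.List.pyGetD lst i 0 == y_pred then (st.1, st.2 + 1) else st)
        else
          (if PySem.List.pyGetD lst i 0 == y_pred then (st.1 + 1, st.2) else st)) (0, 0)
      = (PySem.List.enumerate lst 0).foldl
      (fun (st : Int × Int) p =>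
        if PySem.Int.mod p.1 2 == 0 then
          (if p.2 == y_pred then (st.1, st.2 + 1) else st)
        else
          (if p.2 == y_pred then (st.1 + 1, st.2) else st)) (0, 0) := by
    rw [hmap, List.foldl_map]
    simp [PySem.List.len]
  rw [hb, foldA_char]
  rw [slice2_evens, slice2_odds]
  simp [PySem.List.count_eq, PySem.Int.mod]
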